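/-
  jsmn_d.bin: `jsmn_parse`, `case '}': case ']':` (100329H – 100342H, 1003ABH – 100414H, 100543H – 100549H: 39 instructions, two loops, heads
  1003B5H and 1003F7H). Without parent links: scan down from `toknext - 1` for the nearest open token (none: JSMN_ERROR_INVAL); its type must be the
  bracket's (else JSMN_ERROR_INVAL); `toksuper = -1`, `token->end = pos + 1`; scan on down from the same index for the next open token, which becomes
  `toksuper`. = `Jsmn.closeBracket` → `closeScan` (with `scanOpen`, twice).
-/
import Prog.Jsmn.D.ScanLemmas

namespace X86
namespace J6
namespace D
open X86.User (CodeAt RegsKept Span FlagsOK Layout toNat_add_ofNat toNat_ofNat_lt' add_ofNat_add)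
open Jsmn JsmnDBytes

set_option maxRecDepth 100000
set_option maxHeartbeats 4000000
set_option linter.unusedSimpArgs false
set_option linter.unusedVariables false

/-! ### The model side -/

/-- The bracket's token type: `}` closes an object (1), `]` an array (2). -/
def cloType (ch : UInt8) : Nat := if ch == 0x7d then JSMN_OBJECT else JSMN_ARRAY

theorem body_close (js : List UInt8) (fuel n : Nat) (s : St) (ch : UInt8) (hch : ch = 0x7d ∨ ch = 0x5d) :
    body Config.default js fuel n s ch = closeBracket Config.default ch s := by
  rcases hch with rfl | rfl <;> simp [body]

theorem closeBracket_none {s : St} (ch : UInt8) (hts : s.toks = none) : closeBracket Config.default ch s = some (.next s) := by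
  simp [closeBracket, hts]

theorem closeBracket_some {s : St} {ts : Tokens} (ch : UInt8) (hts : s.toks = some ts) :
    closeBracket Config.default ch s = some (closeScan (cloType ch) s ts) := by
  simp [closeBracket, hts, cloType, links_default]

/-- The tokens after `tokens[j].end = pos + 1`. -/
def cloTs (s : St) (ts : Tokens) (j : Nat) : Tokens := ts.set j { ts.getD j default with «end» := i32 (s.p.pos + 1) }

/-- The state between the two scans: `toksuper = -1`, token `j` closed. -/
def cloMid (s : St) (ts : Tokens) (j : Nat) : St := { s with p := { s.p with toksuper := -1 }, toks := some (cloTs s ts j) }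

/-- The second scan, from a state `s1` with tokens `ts1`: `toksuper` = the nearest token at `j` or below that is open, if there is one. -/
def res2 (s1 : St) (ts1 : Tokens) (j : Nat) : St :=
  match scanOpen ts1 (j + 1) with
  | none => s1
  | some k => { s1 with p := { s1.p with toksuper := k } }

/-- The state after the second scan. -/
def cloRes (s : St) (ts : Tokens) (j : Nat) : St := res2 (cloMid s ts j) (cloTs s ts j) j

theorem closeScan_none {s : St} {ts : Tokens} (type : Nat) (htn : s.p.toknext ≤ 2147483648) (hsc : scanOpen ts s.p.toknext = none) :
    closeScan type s ts = .ret JSMN_ERROR_INVAL s := by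
  have e : ((s.p.toknext : Int) - 1 + 1).toNat = s.p.toknext := by omega
  simp only [closeScan, i32_pred htn]
  rw [if_neg (by omega), e, hsc]

theorem closeScan_mismatch {s : St} {ts : Tokens} {j : Nat} (type : Nat) (htn : s.p.toknext ≤ 2147483648) (hsc : scanOpen ts s.p.toknext = some j)
    (hty : (ts.getD j default).type ≠ type) : closeScan type s ts = .ret JSMN_ERROR_INVAL s := by
  have e : ((s.p.toknext : Int) - 1 + 1).toNat = s.p.toknext := by omega
  simp only [closeScan, i32_pred htn]
  rw [if_neg (by omega), e, hsc]
  have hb : ((ts.getD j default).type != type) = true := by simpa using hty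
  simp only [hb, if_true]

theorem closeScan_found {s : St} {ts : Tokens} {j : Nat} (type : Nat) (htn : s.p.toknext ≤ 2147483648) (hsc : scanOpen ts s.p.toknext = some j)
    (hty : (ts.getD j default).type = type) : closeScan type s ts = .next (cloRes s ts j) := by
  have e : ((s.p.toknext : Int) - 1 + 1).toNat = s.p.toknext := by omega
  simp only [closeScan, i32_pred htn]
  rw [if_neg (by omega), e, hsc]
  have hb : ((ts.getD j default).type != type) = false := by rw [hty]; simp
  simp only [hb, Bool.false_eq_true, if_false, cloRes, res2, cloMid, cloTs]
  cases scanOpen (ts.set j { ts.getD j default with «end» := i32 (s.p.pos + 1) }) (j + 1) <;> rfl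

/-! ### The second scan (head 1003F7H) -/

/-- The invariant at the head of the second scan: `eax = k - 1`, no open token in `[k, j]`. -/
structure CloInv2 (c : PCtx) (n : User.Layout) (v0 : User.State) (s1 : St) (ts1 : Tokens) (j k : Nat) (v : User.State) : Prop where
  rip : v.rip = 0x1003f7
  core : FrameCore c n v0 v s1.p s1.toks
  r15 : v.reg .r15 = UInt64.ofNat (u32 s1.count)
  rax : v.reg .rax = UInt64.ofNat (u32 ((k : Int) - 1))
  kle : k ≤ c.numTokens
  scan : scanOpen ts1 (j + 1) = scanOpen ts1 k

theorem clo2_body {n : User.Layout} {c : PCtx} {v0 v : User.State} {s1 : St} {ts1 : Tokens} {j : Nat} (hts : s1.toks = some ts1)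
    (hcnt : -2147483648 ≤ s1.count ∧ s1.count < 2147483648) (hsmall : c.numTokens ≤ 2147483648)
    (hinv' : Inv Config.default (res2 s1 ts1 j).p (res2 s1 ts1 j).toks c.numTokens) (k : Nat) (hi : CloInv2 c n v0 s1 ts1 j k v) :
    Reach n v (fun v' => AtNext c n v0 v' (res2 s1 ts1 j) ∨ ∃ k', k' < k ∧ CloInv2 c n v0 s1 ts1 j k' v') := by
  obtain ⟨p, toks, count⟩ := s1
  dsimp only at hts hcnt
  subst hts
  have hfc := hi.core
  have htl := hfc.tlen_some
  have hcode := hfc.code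
  have henv := hfc.entry.pre.env
  have hcall := hfc.entry.pre.call
  have hW := hfc.entry.pre.toksW
  v3_open hi henv hcall hW
  j6_bin
  obtain ⟨htb, hlen, htoks⟩ := hi_core_toksArg
  have hR := hfc.entry.pre.env.toksR.resolve_left htb
  v3_open hR
  j6_bin
  simp only [PCtx.tlen, htl, dataWins] at *
  rcases k with _ | k
  · -- nothing left to look at: toksuper stays -1
    rw [u32_pred_zero] at hi_rax
    v3_walk hcode hcall.fetch [] until [0x100462]
    have hres : res2 ⟨p, some ts1, count⟩ ts1 j = ⟨p, some ts1, count⟩ := by unfold res2; rw [hi_scan]; rfl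
    rw [hres] at hinv' ⊢
    exact Reach.done (Or.inl ⟨by simp, hfc.of_kept (by simp) (by v3_kept), by v3_regnorm; exact hi_r15, hcnt, hinv'⟩)
  · have hk32 : k < 2147483648 := by omega
    rw [u32_pred_succ k (by omega)] at hi_rax
    have ht := htoks.getD k (by omega)
    have haddr : tokAddr Config.default c.tb k = UInt64.ofNat (16 * k) + c.tb := by
      unfold tokAddr; rw [tokSize_default]; exact UInt64.add_comm _ _
    rw [haddr] at ht
    obtain ⟨hrs, -, -⟩ := ht.start
    obtain ⟨hre, -, -⟩ := ht.«end»
    have hopen := isOpen_raw ht.start ht.«end»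
    rw [hrs, hre] at hopen
    have hu1 := u32_lt (ts1.getD k default).start
    have hu2 := u32_lt (ts1.getD k default).«end»
    have hsx : Word.sext (UInt64.ofNat k) 32 = UInt64.ofNat k := by word_omega
    have hsh := shl4_ofNat k (by omega)
    have hpred : u32 ((k : Int) - 1) = (k + 4294967295) % 4294967296 := by unfold u32; omega
    v3_walk hcode hcall.fetch [hsx, hsh] until [0x100462, 0x1003f7]
    · -- start == -1: not open, go on down
      have hno : ¬ (ts1.getD k default).isOpen = true := by rw [hopen]; intro h; apply h.1; v3_omega
      refine Reach.done (Or.inr ⟨k, by omega, by simp, hfc.of_kept (by simp) (by v3_kept), by v3_regnorm; exact hi_r15,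
        ?_, by omega, by rw [hi_scan, scanOpen_succ_closed hno]⟩)
      v3_regnorm; rw [hpred]; v3_omega
    · -- end != -1: not open, go on down
      have hno : ¬ (ts1.getD k default).isOpen = true := by rw [hopen]; intro h; apply hbr_10040f; rw [h.2]; rfl
      refine Reach.done (Or.inr ⟨k, by omega, by simp, hfc.of_kept (by simp) (by v3_kept), by v3_regnorm; exact hi_r15,
        ?_, by omega, by rw [hi_scan, scanOpen_succ_closed hno]⟩)
      v3_regnorm; rw [hpred]; v3_omega
    · -- an open token: toksuper = k
      have hyes : (ts1.getD k default).isOpen = true := by rw [hopen]; constructor <;> v3_omega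
      have hsc : scanOpen ts1 (j + 1) = some k := by rw [hi_scan, scanOpen_succ_open hyes]
      have hres : res2 ⟨p, some ts1, count⟩ ts1 j = ⟨{ p with toksuper := k }, some ts1, count⟩ := by unfold res2; rw [hsc]
      rw [hres] at hinv' ⊢
      have hu : u32 (k : Int) = k := by unfold u32; omega
      refine Reach.done (Or.inl ⟨by simp, ⟨?_, by v3_regnorm; exact hi_r15, hcnt, hinv'⟩⟩)
      refine hfc.store_parser (a := c.pa + 8) (by v3_memnorm; rfl) (by v3_kept) (by v3_omega)
        ⟨by v3_frame hi_core_parser_pos, by v3_frame hi_core_parser_toknext,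
          holds32_read (by v3_read) ⟨?_, by dsimp only; omega, by dsimp only; omega⟩⟩
      dsimp only; rw [hu]; v3_omega

/-! ### The first scan (head 1003B5H) -/

/-- The invariant at the head of the first scan: `eax = j - 1`, the bracket's type in esi, pos in ecx, no open token at `j` or above. -/
structure CloInv1 (c : PCtx) (n : User.Layout) (v0 : User.State) (s : St) (ts : Tokens) (type : Nat) (j : Nat) (v : User.State) : Prop where
  rip : v.rip = 0x1003b5
  frame : Frame c n v0 v s
  rax : v.reg .rax = UInt64.ofNat (u32 ((j : Int) - 1))
  rsi : v.reg .rsi = UInt64.ofNat type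
  rcx : v.reg .rcx = UInt64.ofNat s.p.pos
  jle : j ≤ c.numTokens
  scan : scanOpen ts s.p.toknext = scanOpen ts j

/-- One trip round the first scan: the case is over (an error), or the open token is found and closed (on to the second scan), or on down. -/
theorem clo1_body {n : User.Layout} {c : PCtx} {v0 v : User.State} {s : St} {ts : Tokens} {type : Nat} (hts : s.toks = some ts) (hty : type < 4294967296)
    (j : Nat) (hi : CloInv1 c n v0 s ts type j v) :
    Reach n v (fun v' => (Outcome c n v0 v' (some (closeScan type s ts)) ∨
        ∃ j0, closeScan type s ts = .next (cloRes s ts j0) ∧ CloInv2 c n v0 (cloMid s ts j0) (cloTs s ts j0) j0 (j0 + 1) v') ∨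
      ∃ j', j' < j ∧ CloInv1 c n v0 s ts type j' v') := by
  obtain ⟨p, toks, count⟩ := s
  dsimp only at hts
  subst hts
  have hf := hi.frame
  have hfc := hf.core
  have htl := hfc.tlen_some
  have hcode := hfc.code
  have henv := hfc.entry.pre.env
  have hcall := hfc.entry.pre.call
  have hW := hfc.entry.pre.toksW
  v3_open hi henv hcall hW
  j6_bin
  obtain ⟨htb, hlen, htoks⟩ := hi_frame_core_toksArg
  have hR := hfc.entry.pre.env.toksR.resolve_left htb
  v3_open hR
  j6_bin
  simp only [PCtx.tlen, htl, dataWins] at *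
  have htinv := hf.inv.toks ts rfl
  have hsmall := htinv.small
  have htn : p.toknext ≤ 2147483648 := by have := htinv.toknext; dsimp only at this; omega
  have e1 : ((233 : Nat) == 235) = false := by decide
  have e2 : ((233 : UInt8) == 235) = false := by decide
  have e3 : ((233 : UInt64) == 235) = false := by decide
  rcases j with _ | j
  · -- no open token at all: JSMN_ERROR_INVAL
    rw [u32_pred_zero] at hi_rax
    v3_walk hcode hcall.fetch [e1, e2, e3] until [0x100529]
    have hsc : scanOpen ts p.toknext = none := by rw [hi_scan]; rfl
    rw [closeScan_none (s := ⟨p, some ts, count⟩) type htn hsc]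
    refine Reach.done (Or.inl (Or.inl ⟨by simp, hfc.of_mem_eq (by simp) (by simp) (by simp) (by simp) (by simp) (by simp), ?_⟩))
    v3_regnorm; rfl
  · have hj32 : j < 2147483648 := by omega
    rw [u32_pred_succ j (by omega)] at hi_rax
    have ht := htoks.getD j (by omega)
    have haddr : tokAddr Config.default c.tb j = UInt64.ofNat (16 * j) + c.tb := by
      unfold tokAddr; rw [tokSize_default]; exact UInt64.add_comm _ _
    rw [haddr] at ht
    have hty0 := ht.type
    have hty32 : (ts.getD j default).type < 2 ^ 32 := hty0 ▸ User.Mem.readLE4_lt _ _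
    obtain ⟨hrs, -, -⟩ := ht.start
    obtain ⟨hre, -, -⟩ := ht.«end»
    have hopen := isOpen_raw ht.start ht.«end»
    rw [hrs, hre] at hopen
    have hu1 := u32_lt (ts.getD j default).start
    have hu2 := u32_lt (ts.getD j default).«end»
    have hsx : Word.sext (UInt64.ofNat j) 32 = UInt64.ofNat j := by word_omega
    have hsh := shl4_ofNat j (by omega)
    have hpred : u32 ((j : Int) - 1) = (j + 4294967295) % 4294967296 := by unfold u32; omega
    have hpos1 : u32 ((p.pos : Int) + 1) = (p.pos + 1) % 4294967296 := by unfold u32; omega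
    v3_walk hcode hcall.fetch [hsx, hsh, e1, e2, e3] until [0x100529, 0x1003b5, 0x1003f7]
    · -- start == -1: not open, go on down
      have hno : ¬ (ts.getD j default).isOpen = true := by rw [hopen]; intro h; apply h.1; v3_omega
      refine Reach.done (Or.inr ⟨j, by omega, by simp, hf.of_kept (by simp) (by v3_kept), ?_, by v3_regnorm; exact hi_rsi, by v3_regnorm; exact hi_rcx,
        by omega, by rw [hi_scan, scanOpen_succ_closed hno]⟩)
      v3_regnorm; rw [hpred]; v3_omega
    · -- end != -1: not open, go on down
      have hno : ¬ (ts.getD j default).isOpen = true := by rw [hopen]; intro h; apply hbr_1003cd; rw [h.2]; rfl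
      refine Reach.done (Or.inr ⟨j, by omega, by simp, hf.of_kept (by simp) (by v3_kept), ?_, by v3_regnorm; exact hi_rsi, by v3_regnorm; exact hi_rcx,
        by omega, by rw [hi_scan, scanOpen_succ_closed hno]⟩)
      v3_regnorm; rw [hpred]; v3_omega
    · -- the open token is of the other type: JSMN_ERROR_INVAL
      have hyes : (ts.getD j default).isOpen = true := by rw [hopen]; constructor <;> v3_omega
      have hsc : scanOpen ts p.toknext = some j := by rw [hi_scan, scanOpen_succ_open hyes]
      have hne : (ts.getD j default).type ≠ type := by v3_omega
      rw [closeScan_mismatch (s := ⟨p, some ts, count⟩) type htn hsc hne]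
      refine Reach.done (Or.inl (Or.inl ⟨by simp, hfc.of_mem_eq (by simp) (by simp) (by simp) (by simp) (by simp) (by simp), ?_⟩))
      v3_regnorm; rfl
    · -- the open token, of the right type: toksuper = -1, end = pos + 1, on to the second scan from the same index
      have hyes : (ts.getD j default).isOpen = true := by rw [hopen]; constructor <;> v3_omega
      have hsc : scanOpen ts p.toknext = some j := by rw [hi_scan, scanOpen_succ_open hyes]
      have heq : (ts.getD j default).type = type := by v3_omega
      have hjl : j < ts.length := by omega
      refine Reach.done (Or.inl (Or.inr ⟨j, closeScan_found (s := ⟨p, some ts, count⟩) type htn hsc heq, by simp, ?_, by v3_regnorm; exact hi_frame_r15,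
        by v3_regnorm; rw [u32_pred_succ j (by omega)]; exact hi_rax, by omega, rfl⟩))
      dsimp only [cloMid, cloTs]
      refine hfc.store_super_token (b := UInt64.ofNat (16 * j) + c.tb + 8) (by v3_memnorm; rfl) (by v3_kept) (by v3_omega)
        ⟨by v3_frame hi_frame_core_parser_pos, by v3_frame hi_frame_core_parser_toknext, holds32_read (by v3_read) holds32_neg1⟩
        (by rw [List.length_set]; exact hlen) ?_
      v3_memnorm
      refine TokensAt.update htoks hjl (by rw [tokSize_default, hlen]; v3_omega) (by rw [tokSize_default]; v3_eqon)
        (by rw [tokSize_default, hlen]; v3_eqon) ?_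
      rw [haddr]
      have hst := ht.start
      have hsz := ht.size
      refine ⟨by v3_frame hty0, by v3_frame hst, holds32_read (raw := u32 ((p.pos : Int) + 1)) (by rw [hpos1]; v3_read) (holds32_i32 _),
        by v3_frame hsz, fun h => absurd h (by decide)⟩

/-! ### The two scans composed, and the entry of the case -/

/-- From the head of the first scan to the end of the case. -/
theorem close_loops {n : User.Layout} {c : PCtx} {v0 v : User.State} {s : St} {ts : Tokens} {type : Nat} (hts : s.toks = some ts) (hty : type < 4294967296)
    (hsafe : ∀ s', closeScan type s ts = .next s' → Inv Config.default s'.p s'.toks c.numTokens)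
    (j : Nat) (hi : CloInv1 c n v0 s ts type j v) : Reach n v (fun v' => Outcome c n v0 v' (some (closeScan type s ts))) := by
  have hf := hi.frame
  have hsmall := (hf.inv.toks ts hts).small
  refine Reach.trans (Reach.loopOn (Inv := CloInv1 c n v0 s ts type) (fun k v hi => clo1_body hts hty k hi) j v hi) ?_
  rintro v1 (hout | ⟨j0, hcs, hi2⟩)
  · exact Reach.done hout
  · rw [hcs]
    have hinv' := hsafe _ hcs
    exact Reach.loopOn (Inv := CloInv2 c n v0 (cloMid s ts j0) (cloTs s ts j0) j0)
      (fun k v hi => clo2_body (s1 := cloMid s ts j0) rfl hf.cnt hsmall hinv' k hi) (j0 + 1) v1 hi2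

/-- **100329H → 100462H / 100529H: `case '}': case ']':` computes `Jsmn.closeBracket`.** -/
theorem close_reach (sf : SafeFacts binD.cfg) {n : User.Layout} {c : PCtx} {v0 v : User.State} {s : St} {ch : UInt8} {fuel : Nat} (hch : ch = 0x7d ∨ ch = 0x5d)
    (hc : AtCase c n v0 v s 0x100329 ch) : Reach n v (fun v' => Outcome c n v0 v' (body Config.default c.js fuel c.numTokens s ch)) := by
  have hf := hc.frame
  have hsafe := (sf.body c.js fuel c.numTokens s ch hf.inv hf.cnt).1
  rw [binD_cfg, body_close _ _ _ _ _ hch] at hsafe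
  rw [body_close _ _ _ _ _ hch]
  obtain ⟨p, toks, count⟩ := s
  have hfc := hf.core
  have hcode := hfc.code
  have henv := hfc.entry.pre.env
  have hcall := hfc.entry.pre.call
  have hrip := hc.rip
  have hrbx := hc.rbx
  have hrcx := hc.rcx rfl
  have hW := hfc.entry.pre.toksW
  v3_open hf henv hcall hW
  j6_bin
  cases toks with
  | none =>
    -- counting mode: nothing to do
    have htb : c.tb = 0 := hf_core_toksArg
    rw [closeBracket_none ch rfl]
    v3_walk hcode hcall.fetch [] until [0x100462]
    exact Reach.done ⟨by simp, hf.of_kept (by simp) (by v3_kept)⟩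
  | some ts =>
    have htl := hfc.tlen_some
    obtain ⟨htb, hlen, htoks⟩ := hf_core_toksArg
    have hR := hfc.entry.pre.env.toksR.resolve_left htb
    v3_open hR
    j6_bin
    simp only [PCtx.tlen, htl, dataWins] at *
    have htinv := hf.inv.toks ts rfl
    have hsmall := htinv.small
    have htn : p.toknext ≤ c.numTokens := htinv.toknext
    have hpred : u32 ((p.toknext : Int) - 1) = (p.toknext + 4294967295) % 4294967296 := by unfold u32; omega
    rw [closeBracket_some ch rfl] at hsafe ⊢
    have hsafe' : ∀ s', closeScan (cloType ch) ⟨p, some ts, count⟩ ts = .next s' → Inv Config.default s'.p s'.toks c.numTokens :=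
      fun s' h => (hsafe s' (by rw [h])).1
    rcases hch with rfl | rfl
    · -- `}`: an object
      have hrbx' : v.reg .rbx = 0x7d := hrbx
      v3_walk hcode hcall.fetch [] until [0x1003b5]
      refine close_loops (type := cloType 0x7d) rfl (by decide) hsafe' p.toknext
        ⟨by simp, hf.of_kept (by simp) (by v3_kept), ?_, by v3_regnorm; rfl, by v3_regnorm; exact hrcx, htn, rfl⟩
      v3_regnorm; rw [hpred]; v3_omega
    · -- `]`: an array
      have hrbx' : v.reg .rbx = 0x5d := hrbx
      v3_walk hcode hcall.fetch [] until [0x1003b5]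
      refine close_loops (type := cloType 0x5d) rfl (by decide) hsafe' p.toknext
        ⟨by simp, hf.of_kept (by simp) (by v3_kept), ?_, by v3_regnorm; rfl, by v3_regnorm; exact hrcx, htn, rfl⟩
      v3_regnorm; rw [hpred]; v3_omega

/-- `case '}': case ']':`, as the region statement of Prog/Jsmn/D/ParseInv.lean. -/
theorem close_spec (sf : SafeFacts binD.cfg) (n : User.Layout) : CloseSpec n := fun _ _ _ _ _ _ hch hc _ => close_reach sf hch hc

end D
end J6
end X86
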